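-- pv_equiv track=rewrite | github.com/ramisbahi/calling-convention-validation | callconv.py | calc_last_op_index
-- ===== SOURCE A (Python) =====
-- def calc_last_op_index(tokens):
--     ret = 0
--     for i, token in enumerate(tokens):
--         if '#' in token: # comment or new line
--             break
--         elif token != '':
--             ret = i
--     return ret
-- ===== SOURCE B (Python) =====
-- def calc_last_op_index(tokens):
--     # cutoff: index of first token containing '#', or len(tokens)
--     cutoff = next((i for i, t in enumerate(tokens) if '#' in t), len(tokens))
--     pref = tokens[:cutoff]
--     # scan backwards for the last non-empty token before the cutoff
--     for i in range(len(pref) - 1, -1, -1):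
--         if pref[i] != '':
--             return i
--     return 0
-- ===== Notes on version B (the rewrite author's own statement) =====
-- stated objective: alternative
-- what changed: Replaces the forward enumerate loop with last-seen accumulator by a boundary computation (first '#' token index) followed by a backward early-exit scan of the prefix.
import Mathlib
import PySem

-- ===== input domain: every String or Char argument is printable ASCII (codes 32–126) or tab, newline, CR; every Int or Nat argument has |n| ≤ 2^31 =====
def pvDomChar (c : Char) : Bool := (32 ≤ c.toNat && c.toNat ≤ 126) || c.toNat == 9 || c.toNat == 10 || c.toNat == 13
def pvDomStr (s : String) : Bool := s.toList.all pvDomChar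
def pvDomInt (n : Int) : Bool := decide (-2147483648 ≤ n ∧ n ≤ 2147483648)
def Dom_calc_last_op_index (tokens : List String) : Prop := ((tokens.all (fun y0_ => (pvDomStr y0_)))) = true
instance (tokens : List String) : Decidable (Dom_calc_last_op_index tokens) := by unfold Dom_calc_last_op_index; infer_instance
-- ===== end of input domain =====

-- B replaces A's forward accumulator loop by a cutoff computation plus a backward early-exit scan (alternative decomposition, same cost).


-- ===== PORT A =====
-- the for-loop with break: state (i, ret); '#' in token → PySem.Str.isIn
def pvGoA : List String → Nat → Int → Int
  | [], _, ret => ret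
  | token :: rest, i, ret =>
    if PySem.Str.isIn "#" token then ret
    else pvGoA rest (i + 1) (if token ≠ "" then (i : Int) else ret)

def calc_last_op_index (tokens : List String) : Int := pvGoA tokens 0 0

-- ===== PORT B =====
-- cutoff = next((i for i,t in enumerate(tokens) if '#' in t), len(tokens))
def pvCutoff : List String → Nat
  | [] => 0
  | t :: rest => if PySem.Str.isIn "#" t then 0 else pvCutoff rest + 1

-- 'for i in range(len(pref)-1, -1, -1): if pref[i] != "": return i' then 'return 0';
-- argument n = number of indices still to scan (i = n-1); pref[i] is always in range, so getD is exact here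
def pvBackScan (pref : List String) : Nat → Int
  | 0 => 0
  | n + 1 => if pref.getD n "" ≠ "" then (n : Int) else pvBackScan pref n

def calc_last_op_index_alt (tokens : List String) : Int :=
  let pref := tokens.take (pvCutoff tokens)
  pvBackScan pref pref.length

-- ===== PRECONDITION & SPEC =====
def Spec_calc_last_op_index (tokens : List String) (out : Int) : Prop := out = calc_last_op_index_alt tokens
instance (tokens : List String) (out : Int) : Decidable (Spec_calc_last_op_index tokens out) := by unfold Spec_calc_last_op_index; infer_instance

-- ===== CLAIM (what is proved, stated in full; the proofs are below) =====
def Claim_equal_calc_last_op_index : Prop := ∀ (tokens : List String), Dom_calc_last_op_index tokens → Spec_calc_last_op_index tokens (calc_last_op_index tokens)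

-- ===== LEMMAS AND PROOFS =====

-- the backward scan with an index offset and a default, generalising pvBackScan
def pvAux (pref : List String) : Nat → Nat → Int → Int
  | 0, _, ret => ret
  | n + 1, i, ret => if pref.getD n "" ≠ "" then ((i : Int) + n) else pvAux pref n i ret

theorem pvAux_cons (t : String) (pref : List String) (n i : Nat) (ret : Int) :
    pvAux (t :: pref) (n + 1) i ret = pvAux pref n (i + 1) (if t ≠ "" then (i : Int) else ret) := by
  induction n generalizing ret with
  | zero => simp [pvAux]
  | succ m ih =>
    show (if (t :: pref).getD (m + 1) "" ≠ "" then ((i : Int) + (m + 1)) else pvAux (t :: pref) (m + 1) i ret) = _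
    rw [ih]
    show _ = (if pref.getD m "" ≠ "" then (((i : Nat) + 1 : Nat) : Int) + m else _)
    simp only [List.getD, List.getElem?_cons_succ]
    split <;> [push_cast; rfl]
    ring

theorem pvGoA_eq_aux (ts : List String) (i : Nat) (ret : Int) :
    pvGoA ts i ret = pvAux (ts.take (pvCutoff ts)) (ts.take (pvCutoff ts)).length i ret := by
  induction ts generalizing i ret with
  | nil => simp [pvGoA, pvCutoff, pvAux]
  | cons t rest ih =>
    show (if PySem.Str.isIn "#" t then ret else _) = _
    by_cases h : PySem.Str.isIn "#" t
    · rw [if_pos h]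
      show _ = pvAux (List.take (pvCutoff (t :: rest)) (t :: rest)) _ i ret
      rw [show pvCutoff (t :: rest) = 0 from by have h' := h; simp at h'; simp [pvCutoff, h']]
      rfl
    · rw [if_neg h]
      rw [show pvCutoff (t :: rest) = pvCutoff rest + 1 from by have h' := h; simp at h'; simp [pvCutoff, h']]
      simp only [List.take_succ_cons, List.length_cons]
      rw [pvAux_cons, ← ih]

theorem pvAux_zero (pref : List String) (n : Nat) : pvAux pref n 0 0 = pvBackScan pref n := by
  induction n with
  | zero => rfl
  | succ m ih => simp [pvAux, pvBackScan, ih]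

-- ===== VERDICT (by name: the statement is the Claim_ definition above) =====
theorem calc_last_op_index_spec : Claim_equal_calc_last_op_index := by
  intro tokens _
  show calc_last_op_index tokens = calc_last_op_index_alt tokens
  rw [calc_last_op_index, calc_last_op_index_alt, pvGoA_eq_aux, pvAux_zero]
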